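-- pv_equiv track=rewrite | github.com/UIUC-Chatbot/ai-teaching-assistant-uiuc | main.py | _contriever_clean_contexts
-- ===== SOURCE A (Python) =====
-- def _contriever_clean_contexts(raw_context_list):
--     ''' clean contriever results. Currently this only removed newline characters. That's the main problem. '''
--     top_context_list = []
--     for i, context in enumerate(raw_context_list):
--         cleaned_words_list = []
--         for sub in context:
--             cleaned_words_list.append(sub.replace("\n", ""))
--         top_context_list.append("".join(cleaned_words_list))
--
--     return top_context_list
-- ===== SOURCE B (Python) =====
-- def _contriever_clean_contexts(raw_context_list):
--     # Recursive decomposition; each context cleaned by character-level filtering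
--     # (stream every character of every substring, dropping newlines) instead of
--     # per-substring str.replace followed by a join.
--     if not raw_context_list:
--         return []
--     head = raw_context_list[0]
--     cleaned = ''.join(c for sub in head for c in sub if c != '\n')
--     return [cleaned] + _contriever_clean_contexts(raw_context_list[1:])
-- ===== Notes on version B (the rewrite author's own statement) =====
-- stated objective: alternative
-- what changed: Replaces the iterative accumulator loop using per-substring str.replace + join by a recursive decomposition over the list that cleans each context by streaming its characters and filtering out newlines (character-level filter instead of substring replace).
import Mathlib
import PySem

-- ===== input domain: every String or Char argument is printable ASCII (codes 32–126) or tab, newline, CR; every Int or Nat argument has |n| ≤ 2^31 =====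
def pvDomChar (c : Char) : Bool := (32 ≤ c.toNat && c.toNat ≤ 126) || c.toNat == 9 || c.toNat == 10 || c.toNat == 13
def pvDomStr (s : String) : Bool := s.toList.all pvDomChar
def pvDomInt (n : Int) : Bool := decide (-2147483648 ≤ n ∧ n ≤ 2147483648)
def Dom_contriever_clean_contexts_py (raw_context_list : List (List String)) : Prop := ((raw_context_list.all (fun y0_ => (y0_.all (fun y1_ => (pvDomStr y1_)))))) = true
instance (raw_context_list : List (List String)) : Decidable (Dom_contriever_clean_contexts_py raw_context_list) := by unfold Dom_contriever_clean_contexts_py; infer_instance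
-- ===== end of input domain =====

-- B recurses over the list and cleans each context by filtering newline characters out of its character stream (alternative decomposition, same cost).

-- ===== PORT A =====
-- loop over enumerate(raw_context_list): inner loop cleans each element with replace, then "".join
def contriever_clean_contexts_py (raw_context_list : List (List String)) : List String :=
  (PySem.List.enumerate raw_context_list).foldl
    (fun top_context_list ic =>
      let cleaned_words_list :=
        ic.2.foldl (fun acc sub => acc ++ [PySem.Str.replace sub "\n" ""]) []
      top_context_list ++ [PySem.Str.join "" cleaned_words_list])
    []

-- ===== PORT B =====
-- recursion on the list; per context: stream all characters of all substrings, keep non-'\n', join into a string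
def contriever_clean_contexts_py_alt : List (List String) → List String
  | [] => []
  | head :: rest =>
      String.ofList ((head.flatMap (fun sub => sub.toList)).filter (fun c => c != '\n')) ::
        contriever_clean_contexts_py_alt rest

-- ===== PRECONDITION & SPEC =====
def Spec_contriever_clean_contexts_py (raw_context_list : List (List String)) (out : List String) : Prop := out = contriever_clean_contexts_py_alt raw_context_list
instance (raw_context_list : List (List String)) (out : List String) : Decidable (Spec_contriever_clean_contexts_py raw_context_list out) := by unfold Spec_contriever_clean_contexts_py; infer_instance

-- ===== CLAIM (what is proved, stated in full; the proofs are below) =====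
def Claim_equal_contriever_clean_contexts_py : Prop := ∀ (raw_context_list : List (List String)), Dom_contriever_clean_contexts_py raw_context_list → Spec_contriever_clean_contexts_py raw_context_list (contriever_clean_contexts_py raw_context_list)

-- ===== LEMMAS AND PROOFS =====

-- a foldl that appends one image per element is a map
theorem pv_foldl_append_map {α β : Type} (f : α → β) (l : List α) (acc : List β) :
    l.foldl (fun a x => a ++ [f x]) acc = acc ++ l.map f := by
  induction l generalizing acc with
  | nil => simp
  | cons x t ih => simp [List.foldl, ih]

-- replace.go with a single-char pattern and empty replacement is filter
theorem pv_go_filter (c0 : Char) (l acc : List Char) (fuel : Nat) (h : l.length ≤ fuel) :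
    PySem.Chars.replace.go [c0] [] fuel l acc = acc.reverse ++ l.filter (fun c => c != c0) := by
  induction l generalizing acc fuel with
  | nil => cases fuel <;> simp [PySem.Chars.replace.go]
  | cons c t ih =>
    cases fuel with
    | zero => simp at h
    | succ n =>
      have ht : t.length ≤ n := by simpa using h
      by_cases hc : c0 = c
      · subst hc
        simp [PySem.Chars.replace.go, List.isPrefixOf, ih acc n ht]
      · have hne : (c0 == c) = false := by simp [hc]
        simp [PySem.Chars.replace.go, List.isPrefixOf, hne, ih (c :: acc) n ht, bne, Ne.symm hc]

-- replacing a single character by "" is filtering it out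
theorem pv_replace_filter (c0 : Char) (l : List Char) :
    PySem.Chars.replace l [c0] [] = l.filter (fun c => c != c0) := by
  simp [PySem.Chars.replace, pv_go_filter c0 l [] l.length le_rfl]

theorem pv_str_replace_newline (s : String) :
    (PySem.Str.replace s "\n" "").toList = s.toList.filter (fun c => c != '\n') := by
  rw [PySem.Str.toList_replace]
  simpa using pv_replace_filter '\n' s.toList

-- "".join with empty separator is flatten
theorem pv_join_empty (ps : List String) :
    (PySem.Str.join "" ps).toList = (ps.map String.toList).flatten := by
  rw [PySem.Str.toList_join]
  simp only [PySem.Chars.join]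
  have h : ∀ (qs : List (List Char)), List.intercalate ([] : List Char) qs = qs.flatten := by
    intro qs
    induction qs with
    | nil => simp [List.intercalate]
    | cons a t ih => cases t <;> simp_all [List.intercalate, List.intersperse]
  have h0 : "".toList = ([] : List Char) := rfl
  rw [h0, h]

-- per-context: A's replace-each-then-join equals B's filter of the character stream
theorem pv_elem (context : List String) :
    PySem.Str.join "" (context.map (fun sub => PySem.Str.replace sub "\n" "")) =
    String.ofList ((context.flatMap (fun sub => sub.toList)).filter (fun c => c != '\n')) := by
  rw [← String.toList_inj]
  rw [pv_join_empty]
  simp only [String.toList_ofList, List.map_map, List.flatMap_def, List.filter_flatten, List.map_map]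
  congr 1
  apply List.map_congr_left
  intro s _
  simp only [Function.comp_apply, pv_str_replace_newline]

-- B is the map of the per-context cleaner
theorem pv_alt_map (l : List (List String)) :
    contriever_clean_contexts_py_alt l =
    l.map (fun context => String.ofList ((context.flatMap (fun sub => sub.toList)).filter (fun c => c != '\n'))) := by
  induction l with
  | nil => rfl
  | cons h t ih => simp [contriever_clean_contexts_py_alt, ih]

-- ===== VERDICT (by name: the statement is the Claim_ definition above) =====
theorem contriever_clean_contexts_py_spec : Claim_equal_contriever_clean_contexts_py := by
  intro raw_context_list _
  unfold Spec_contriever_clean_contexts_py contriever_clean_contexts_py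
  rw [pv_alt_map]
  rw [pv_foldl_append_map
    (fun ic : Int × List String =>
      PySem.Str.join "" (ic.2.foldl (fun acc sub => acc ++ [PySem.Str.replace sub "\n" ""]) []))]
  simp only [List.nil_append]
  rw [show (fun ic : Int × List String =>
      PySem.Str.join "" (ic.2.foldl (fun acc sub => acc ++ [PySem.Str.replace sub "\n" ""]) [])) =
      (fun context : List String =>
      PySem.Str.join "" (context.foldl (fun acc sub => acc ++ [PySem.Str.replace sub "\n" ""]) [])) ∘ Prod.snd
    from rfl, ← List.map_map, PySem.List.map_snd_enumerate]
  apply List.map_congr_left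
  intro context _
  rw [pv_foldl_append_map, List.nil_append, pv_elem]
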